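-- pv_equiv track=rewrite | github.com/freefuiiismyname/ddz-ai | ppo-version/rl/common_func.py | pad_3d
-- ===== SOURCE A (Python) =====
-- def pad_3d(input_list, pad_id):
--     """
--     填充成矩阵
--     """
--     max_1d = max([len(i) for i in input_list])
--     max_2d = max([max([len(j) for j in i]) for i in input_list])
--
--     tensor = []
--     for i in input_list:
--         d1 = []
--         for j in i:
--             d2 = []
--             for k in j:
--                 d2.append(k)
--             while len(d2) < max_2d:
--                 d2.append(pad_id)
--             d1.append(d2)
--         while len(d1) < max_1d:
--             d2 = []
--             for _ in range(max_2d):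
--                 d2.append(pad_id)
--             d1.append(d2)
--         tensor.append(d1)
--
--     return tensor
-- ===== SOURCE B (Python) =====
-- def pad_3d(input_list, pad_id):
--     """
--     填充成矩阵
--     """
--     max_1d = max([len(i) for i in input_list])
--     max_2d = max([max([len(j) for j in i]) for i in input_list])
--     tensor = [[[pad_id] * max_2d for _ in range(max_1d)]
--               for _ in range(len(input_list))]
--     for a, i in enumerate(input_list):
--         for b, j in enumerate(i):
--             for c, k in enumerate(j):
--                 tensor[a][b][c] = k
--     return tensor
-- ===== Notes on version B (the rewrite author's own statement) =====
-- stated objective: alternative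
-- what changed: A grows each row element-by-element with append and pads with while-loops that extend short rows; B pre-allocates the complete pad_id-filled tensor of the final shape and then overwrites only the positions present in the input by indexed assignment in a second pass.
import Mathlib
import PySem

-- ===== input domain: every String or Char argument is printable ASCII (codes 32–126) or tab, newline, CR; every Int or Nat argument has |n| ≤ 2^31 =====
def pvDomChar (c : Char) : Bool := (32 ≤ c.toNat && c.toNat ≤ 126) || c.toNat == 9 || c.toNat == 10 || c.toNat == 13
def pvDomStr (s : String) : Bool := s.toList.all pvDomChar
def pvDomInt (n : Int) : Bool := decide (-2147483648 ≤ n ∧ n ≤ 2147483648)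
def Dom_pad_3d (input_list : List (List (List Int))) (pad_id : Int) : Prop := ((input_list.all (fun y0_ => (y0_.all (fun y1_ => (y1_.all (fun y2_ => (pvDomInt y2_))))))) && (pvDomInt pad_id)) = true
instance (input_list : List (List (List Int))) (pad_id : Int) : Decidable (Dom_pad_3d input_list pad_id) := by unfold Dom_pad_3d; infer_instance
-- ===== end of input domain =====

-- B pre-allocates the complete pad_id-filled tensor of the final shape and overwrites
-- only the positions present in the input in a second pass (objective: alternative).


-- ===== PORT A =====
-- while len(d) < m: d.append(x)   (used for both while-loops of A; the second appends
-- the freshly built blank row, which is the same value each iteration)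
def padWhile {α : Type} (d : List α) (m : Int) (x : α) : List α :=
  if (d.length : Int) < m then padWhile (d ++ [x]) m x else d
termination_by (m - d.length).toNat
decreasing_by simp at *; omega

def pad_3d (input_list : List (List (List Int))) (pad_id : Int) : List (List (List Int)) :=
  -- max([len(i) for i in input_list]); max? is none on [], excluded by Pre_
  let max_1d : Int := (PySem.List.max? (input_list.map (fun i => (i.length : Int))) (fun x => x)).getD 0
  let max_2d : Int := (PySem.List.max? (input_list.map (fun i =>
      (PySem.List.max? (i.map (fun j => (j.length : Int))) (fun x => x)).getD 0)) (fun x => x)).getD 0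
  input_list.foldl (fun tensor i =>
    let d1 := i.foldl (fun d1 j =>
      let d2 := j.foldl (fun d2 k => d2 ++ [k]) []
      let d2 := padWhile d2 max_2d pad_id
      d1 ++ [d2]) []
    let d1 := padWhile d1 max_1d
      ((List.range max_2d.toNat).foldl (fun d2 _ => d2 ++ [pad_id]) [])
    tensor ++ [d1]) []

-- ===== PORT B =====
-- enumerate over nonnegative indices is ported with List.zipIdx (value, index) pairs;
-- tensor[a][b][c] = k is List.modify at a / modify at b / set at c.
def pad_3d_alt (input_list : List (List (List Int))) (pad_id : Int) : List (List (List Int)) :=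
  let max_1d : Int := (PySem.List.max? (input_list.map (fun i => (i.length : Int))) (fun x => x)).getD 0
  let max_2d : Int := (PySem.List.max? (input_list.map (fun i =>
      (PySem.List.max? (i.map (fun j => (j.length : Int))) (fun x => x)).getD 0)) (fun x => x)).getD 0
  let tensor : List (List (List Int)) :=
    (List.range input_list.length).map (fun _ =>
      (List.range max_1d.toNat).map (fun _ => List.replicate max_2d.toNat pad_id))
  (input_list.zipIdx).foldl (fun tensor ia =>
    (ia.1.zipIdx).foldl (fun tensor jb =>
      (jb.1.zipIdx).foldl (fun tensor kc =>
        tensor.modify ia.2 (fun d1 => d1.modify jb.2 (fun d2 => d2.set kc.2 kc.1)))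
        tensor) tensor) tensor

-- ===== PRECONDITION & SPEC =====
-- Pre_ excludes exactly the inputs where Python A raises ValueError (max() of an empty
-- sequence): an empty input_list, or one containing an empty sublist. B raises there too.
def Pre_pad_3d (input_list : List (List (List Int))) (pad_id : Int) : Prop :=
  input_list ≠ [] ∧ ∀ i ∈ input_list, i ≠ []
instance (input_list : List (List (List Int))) (pad_id : Int) : Decidable (Pre_pad_3d input_list pad_id) := by unfold Pre_pad_3d; infer_instance
def pvWitness_pad_3d : List (List (List Int)) × Int := ([[[1, 2], [3]], [[4]]], 0)

def Spec_pad_3d (input_list : List (List (List Int))) (pad_id : Int) (out : List (List (List Int))) : Prop := out = pad_3d_alt input_list pad_id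
instance (input_list : List (List (List Int))) (pad_id : Int) (out : List (List (List Int))) : Decidable (Spec_pad_3d input_list pad_id out) := by unfold Spec_pad_3d; infer_instance

-- ===== CLAIM (what is proved, stated in full; the proofs are below) =====
def Claim_equal_pad_3d : Prop := ∀ (input_list : List (List (List Int))) (pad_id : Int), Dom_pad_3d input_list pad_id → Pre_pad_3d input_list pad_id → Spec_pad_3d input_list pad_id (pad_3d input_list pad_id)

-- ===== LEMMAS AND PROOFS =====

-- the while-loop pads with replicate
lemma padWhile_eq_aux {α : Type} (n : Nat) :
    ∀ (d : List α) (m : Int) (x : α), (m - d.length).toNat = n →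
      padWhile d m x = d ++ List.replicate n x := by
  induction n with
  | zero =>
    intro d m x h
    unfold padWhile
    rw [if_neg (by omega)]
    simp
  | succ n ih =>
    intro d m x h
    unfold padWhile
    rw [if_pos (by omega)]
    rw [ih (d ++ [x]) m x (by simp; omega)]
    simp [List.replicate_succ]

lemma padWhile_eq {α : Type} (d : List α) (m : Int) (x : α) :
    padWhile d m x = d ++ List.replicate (m - d.length).toNat x :=
  padWhile_eq_aux _ d m x rfl

-- range-foldl build of the blank row is replicate
lemma blankRow_eq (n : Nat) (p : Int) :
    (List.range n).foldl (fun d2 _ => d2 ++ [p]) [] = List.replicate n p := by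
  induction n with
  | zero => simp
  | succ n ih =>
    rw [List.range_succ, List.foldl_append, ih]
    simp [List.foldl, List.replicate_succ']

-- repeated modifications at the same index fuse into one
lemma foldl_modify_fuse {α β : Type} (a : Nat) (g : β → α → α) :
    ∀ (xs : List β) (t : List α),
      xs.foldl (fun t x => t.modify a (g x)) t
        = t.modify a (fun d => xs.foldl (fun d x => g x d) d) := by
  intro xs
  induction xs with
  | nil =>
    intro t
    simp only [List.foldl_nil]
    rw [show (fun (d : α) => d) = @id α from rfl, List.modify_id]
  | cons x xs ih =>
    intro t
    simp only [List.foldl_cons]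
    rw [ih, List.modify_modify_eq]
    rfl

-- a modify at index |p| acts on the head of the tail part
lemma modify_append_cons {α : Type} (g : α → α) :
    ∀ (p : List α) (r : α) (t : List α),
      (p ++ r :: t).modify p.length g = p ++ g r :: t := by
  intro p
  induction p with
  | nil => intro r t; simp
  | cons q p ih =>
    intro r t
    simpa [List.modify_succ_cons] using congrArg (q :: ·) (ih r t)

-- one modify per index, indices increasing from |p|: an in-place map of the middle part
lemma foldl_zipIdx_modify {α β : Type} (f : β → α → α) :
    ∀ (xs : List β) (p t rest : List α), t.length = xs.length →
      (xs.zipIdx p.length).foldl (fun acc q => acc.modify q.2 (f q.1)) (p ++ t ++ rest)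
        = p ++ List.zipWith f xs t ++ rest := by
  intro xs
  induction xs with
  | nil =>
    intro p t rest h
    simp at h
    simp [h]
  | cons x xs ih =>
    intro p t rest h
    match t with
    | [] => simp at h
    | r :: t =>
      simp only [List.zipIdx_cons, List.foldl_cons]
      have h1 : (p ++ r :: t ++ rest).modify p.length (f x)
          = (p ++ [f x r]) ++ t ++ rest := by
        simpa using modify_append_cons (f x) p r (t ++ rest)
      rw [h1]
      have h2 := ih (p ++ [f x r]) t rest (by simpa using h)
      simp only [List.length_append, List.length_cons, List.length_nil] at h2 ⊢
      simpa [List.zipWith] using h2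

-- zipping against a constant list of matching length is a map
lemma zipWith_replicate_right {α β γ : Type} (f : α → β → γ) (c : β) :
    ∀ (xs : List α), List.zipWith f xs (List.replicate xs.length c)
      = xs.map (fun x => f x c) := by
  intro xs
  induction xs with
  | nil => rfl
  | cons x xs ih => simp [List.replicate_succ, ih]

-- every length is bounded by its max (outer level)
lemma len_le_max1 (input_list : List (List (List Int))) (i : List (List Int))
    (hi : i ∈ input_list) :
    (i.length : Int) ≤ (PySem.List.max? (input_list.map (fun i => (i.length : Int))) (fun x => x)).getD 0 := by
  rcases h : PySem.List.max? (input_list.map (fun i => (i.length : Int))) (fun x => x) with _ | m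
  · rw [PySem.List.max?_eq_none_iff] at h
    simp at h
    exact absurd hi (by simp [h])
  · simpa [h] using PySem.List.max?_isMax h _ (List.mem_map_of_mem hi)

-- inner-level bound: every j in every i has its length ≤ max_2d
lemma len_le_max2 (input_list : List (List (List Int))) (i : List (List Int))
    (j : List Int) (hi : i ∈ input_list) (hj : j ∈ i) :
    (j.length : Int) ≤ (PySem.List.max? (input_list.map (fun i =>
      (PySem.List.max? (i.map (fun j => (j.length : Int))) (fun x => x)).getD 0)) (fun x => x)).getD 0 := by
  have hinner : (j.length : Int)
      ≤ (PySem.List.max? (i.map (fun j => (j.length : Int))) (fun x => x)).getD 0 := by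
    rcases h : PySem.List.max? (i.map (fun j => (j.length : Int))) (fun x => x) with _ | m
    · rw [PySem.List.max?_eq_none_iff] at h
      simp at h
      exact absurd hj (by simp [h])
    · simpa [h] using PySem.List.max?_isMax h _ (List.mem_map_of_mem hj)
  refine le_trans hinner ?_
  rcases h : PySem.List.max? (input_list.map (fun i =>
      (PySem.List.max? (i.map (fun j => (j.length : Int))) (fun x => x)).getD 0)) (fun x => x) with _ | m
  · rw [PySem.List.max?_eq_none_iff] at h
    simp at h
    exact absurd hi (by simp [h])
  · simpa [h] using PySem.List.max?_isMax h _ (List.mem_map_of_mem hi)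

-- writing row j into a blank row of length m2 yields the padded row
lemma write_inner (j : List Int) (m2 : Nat) (pad : Int) (hj : j.length ≤ m2) :
    (j.zipIdx).foldl (fun d2 kc => d2.set kc.2 kc.1) (List.replicate m2 pad)
      = j ++ List.replicate (m2 - j.length) pad := by
  have hsplit : List.replicate m2 pad
      = List.replicate j.length pad ++ List.replicate (m2 - j.length) pad := by
    rw [← List.replicate_add, Nat.add_sub_cancel' hj]
  have hset : (fun (d2 : List Int) (kc : Int × Nat) => d2.set kc.2 kc.1)
      = (fun (d2 : List Int) (kc : Int × Nat) =>
          d2.modify kc.2 ((fun (k : Int) (_ : Int) => k) kc.1)) := by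
    funext d2 kc
    rw [List.modify_eq_set]
  rw [hset, hsplit]
  have h := foldl_zipIdx_modify (fun (k : Int) (_ : Int) => k) j []
    (List.replicate j.length pad) (List.replicate (m2 - j.length) pad) (by simp)
  simp only [List.length_nil, List.nil_append] at h
  rw [h, zipWith_replicate_right]
  simp

-- ===== VERDICT (by name: the statement is the Claim_ definition above) =====
theorem pad_3d_spec : Claim_equal_pad_3d := by
  intro input_list pad_id _ _
  unfold Spec_pad_3d pad_3d pad_3d_alt
  set max_1d : Int := (PySem.List.max? (input_list.map (fun i => (i.length : Int))) (fun x => x)).getD 0 with hm1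
  set max_2d : Int := (PySem.List.max? (input_list.map (fun i =>
      (PySem.List.max? (i.map (fun j => (j.length : Int))) (fun x => x)).getD 0)) (fun x => x)).getD 0 with hm2
  -- closed form for both sides:
  --   map (fun i => map (pad each row) i ++ replicate blank rows)
  have hA : input_list.foldl (fun tensor i =>
      let d1 := i.foldl (fun d1 j =>
        let d2 := j.foldl (fun d2 k => d2 ++ [k]) []
        let d2 := padWhile d2 max_2d pad_id
        d1 ++ [d2]) []
      let d1 := padWhile d1 max_1d
        ((List.range max_2d.toNat).foldl (fun d2 _ => d2 ++ [pad_id]) [])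
      tensor ++ [d1]) []
      = input_list.map (fun i =>
          i.map (fun j => j ++ List.replicate (max_2d - j.length).toNat pad_id)
            ++ List.replicate (max_1d - i.length).toNat (List.replicate max_2d.toNat pad_id)) := by
    rw [PySem.List.foldl_append_singleton_eq_map]
    apply List.map_congr_left
    intro i _
    rw [PySem.List.foldl_append_singleton_eq_map]
    rw [padWhile_eq, blankRow_eq]
    congr 1
    · apply List.map_congr_left
      intro j _
      rw [show j.foldl (fun d2 k => d2 ++ [k]) [] = j by
        simpa using PySem.List.foldl_append_singleton_eq_map id j]
      rw [padWhile_eq]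
    · simp
  rw [hA]
  -- B side: the blank tensor then the overwrite pass
  have hblank : (List.range max_1d.toNat).map
        (fun _ => List.replicate max_2d.toNat pad_id)
      = List.replicate max_1d.toNat (List.replicate max_2d.toNat pad_id) := by
    simp [List.map_const']
  simp only [hblank]
  -- fuse the two inner loops of B into a single modify at the outer index
  have hfuse : ∀ (t : List (List (List Int))),
      (input_list.zipIdx).foldl (fun tensor ia =>
        (ia.1.zipIdx).foldl (fun tensor jb =>
          (jb.1.zipIdx).foldl (fun tensor kc =>
            tensor.modify ia.2 (fun d1 => d1.modify jb.2 (fun d2 => d2.set kc.2 kc.1)))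
            tensor) tensor) t
      = (input_list.zipIdx).foldl (fun tensor ia =>
          tensor.modify ia.2 (fun d1 =>
            (ia.1.zipIdx).foldl (fun d1 jb =>
              d1.modify jb.2 (fun d2 =>
                (jb.1.zipIdx).foldl (fun d2 kc => d2.set kc.2 kc.1) d2)) d1)) t := by
    intro t
    apply PySem.List.foldl_congr_mem
    intro tensor ia _
    calc (ia.1.zipIdx).foldl (fun tensor jb =>
          (jb.1.zipIdx).foldl (fun tensor kc =>
            tensor.modify ia.2 (fun d1 => d1.modify jb.2 (fun d2 => d2.set kc.2 kc.1)))
            tensor) tensor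
        = (ia.1.zipIdx).foldl (fun tensor jb =>
            tensor.modify ia.2 (fun d1 => d1.modify jb.2 (fun d2 =>
              (jb.1.zipIdx).foldl (fun d2 kc => d2.set kc.2 kc.1) d2))) tensor := by
          apply PySem.List.foldl_congr_mem
          intro tensor jb _
          refine (foldl_modify_fuse ia.2
            (fun (kc : Int × Nat) (d1 : List (List Int)) =>
              d1.modify jb.2 (fun d2 => d2.set kc.2 kc.1)) jb.1.zipIdx tensor).trans ?_
          congr 1
          funext d1
          exact foldl_modify_fuse jb.2
            (fun (kc : Int × Nat) (d2 : List Int) => d2.set kc.2 kc.1) jb.1.zipIdx d1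
      _ = _ :=
          foldl_modify_fuse ia.2
            (fun (jb : List Int × Nat) (d1 : List (List Int)) => d1.modify jb.2 (fun d2 =>
              (jb.1.zipIdx).foldl (fun d2 kc => d2.set kc.2 kc.1) d2)) ia.1.zipIdx tensor
  rw [hfuse]
  -- now one modify per outer index: an in-place map over the blank tensor
  have hlen1 : ∀ i ∈ input_list, i.length ≤ max_1d.toNat := by
    intro i hi
    have := len_le_max1 input_list i hi
    omega
  have hlen2 : ∀ i ∈ input_list, ∀ j ∈ i, j.length ≤ max_2d.toNat := by
    intro i hi j hj
    have := len_le_max2 input_list i j hi hj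
    omega
  have hsplit_t : List.replicate input_list.length
        (List.replicate max_1d.toNat (List.replicate max_2d.toNat pad_id))
      = (List.range input_list.length).map
        (fun _ => List.replicate max_1d.toNat (List.replicate max_2d.toNat pad_id)) := by
    simp [List.map_const']
  rw [← hsplit_t]
  have houter := foldl_zipIdx_modify
    (fun (i : List (List Int)) (d1 : List (List Int)) =>
      (i.zipIdx).foldl (fun d1 jb =>
        d1.modify jb.2 (fun d2 =>
          (jb.1.zipIdx).foldl (fun d2 kc => d2.set kc.2 kc.1) d2)) d1)
    input_list [] (List.replicate input_list.length
      (List.replicate max_1d.toNat (List.replicate max_2d.toNat pad_id))) []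
    (by simp)
  simp only [List.length_nil, List.nil_append, List.append_nil] at houter
  rw [houter, zipWith_replicate_right]
  apply List.map_congr_left
  intro i hi
  -- middle level: split blank at i.length, one modify per index
  have hmid1 : List.replicate max_1d.toNat (List.replicate max_2d.toNat pad_id)
      = List.replicate i.length (List.replicate max_2d.toNat pad_id)
        ++ List.replicate (max_1d.toNat - i.length) (List.replicate max_2d.toNat pad_id) := by
    rw [← List.replicate_add]; congr 1; exact (Nat.add_sub_cancel' (hlen1 i hi)).symm
  rw [hmid1]
  have hmid := foldl_zipIdx_modify
    (fun (j : List Int) (d2 : List Int) =>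
      (j.zipIdx).foldl (fun d2 kc => d2.set kc.2 kc.1) d2)
    i [] (List.replicate i.length (List.replicate max_2d.toNat pad_id))
    (List.replicate (max_1d.toNat - i.length) (List.replicate max_2d.toNat pad_id))
    (by simp)
  simp only [List.length_nil, List.nil_append] at hmid
  rw [hmid, zipWith_replicate_right]
  congr 1
  · apply List.map_congr_left
    intro j hj
    rw [write_inner j max_2d.toNat pad_id (hlen2 i hi j hj)]
    congr 2
    have := hlen2 i hi j hj
    omega
  · congr 1
    have h1 := hlen1 i hi
    have h0 : (0 : Int) ≤ max_1d := le_trans (by positivity) (len_le_max1 input_list i hi)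
    omega
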